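-- pv_equiv track=rewrite | github.com/theferalafk/kauma | util.py | round_rotation
-- ===== SOURCE A (Python) =====
-- def _rotation(rotation):
--     #takes a list as an input and rotates it left, the left most element gets appended most right
--     #return the new array and the former left most element
--     result = rotation[1:]
--     carry = rotation[0]
--     result.append(carry)
--     return [result, carry]
--
-- def round_rotation(rotor_array):
--     #takes a list of rotors as an input and returns a new list for the next round
--     result = []
--     #first rotor has to be rotated
--     carried_byte = 0
--     for i in range(len(rotor_array)):
--         #checks if rotor needs to be rotated
--         if carried_byte == 0:
--             tmp = _rotation(rotor_array[i])
--             result.append(tmp[0])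
--             carried_byte = tmp[1]
--         else:
--             #no rotation
--             result.append(rotor_array[i])
--             carried_byte = 1
--     return result
-- ===== SOURCE B (Python) =====
-- def round_rotation(rotor_array):
--     # find cutoff = index of first rotor whose head byte is nonzero, then
--     # rotate the prefix [:cutoff+1] and keep the suffix untouched (same list objects)
--     cutoff = len(rotor_array)
--     for i, r in enumerate(rotor_array):
--         if r[0] != 0:
--             cutoff = i
--             break
--     return [r[1:] + [r[0]] for r in rotor_array[:cutoff + 1]] + rotor_array[cutoff + 1:]
-- ===== Notes on version B (the rewrite author's own statement) =====
-- stated objective: alternative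
-- what changed: replaces A's stateful carry-simulation loop (mutable carried_byte threaded through every iteration) by a find-the-cutoff scan followed by a two-region construction: rotate the prefix up to and including the first rotor with nonzero head, append the suffix unchanged
import Mathlib
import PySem

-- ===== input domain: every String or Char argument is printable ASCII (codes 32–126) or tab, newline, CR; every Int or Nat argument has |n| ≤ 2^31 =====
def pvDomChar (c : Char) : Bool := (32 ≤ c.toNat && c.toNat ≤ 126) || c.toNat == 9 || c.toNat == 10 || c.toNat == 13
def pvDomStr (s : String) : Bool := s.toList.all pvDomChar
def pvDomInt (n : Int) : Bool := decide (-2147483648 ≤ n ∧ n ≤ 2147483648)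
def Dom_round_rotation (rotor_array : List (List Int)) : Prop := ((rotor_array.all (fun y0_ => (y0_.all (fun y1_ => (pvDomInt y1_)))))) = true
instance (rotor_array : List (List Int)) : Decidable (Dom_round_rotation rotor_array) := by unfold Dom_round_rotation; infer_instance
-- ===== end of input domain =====

-- B replaces A's stateful carry-simulation loop by a find-cutoff scan plus a
-- two-region construction (rotated prefix ++ untouched suffix); alternative, same cost.
-- Equivalence is about return values; neither program mutates its argument.


-- ===== PORT A =====
-- _rotation: result = rotation[1:]; carry = rotation[0]; returns (result ++ [carry], carry).
-- rotation[0] on an empty rotor raises IndexError in Python (pyGet? = none); such inputs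
-- are excluded by Pre_round_rotation, so the .getD 0 default is never reached under Pre_.
def pyRotation (rotation : List Int) : List Int × Int :=
  let result := PySem.List.slice rotation (some 1) none
  let carry := (PySem.List.pyGet? rotation 0).getD 0
  (result ++ [carry], carry)

def round_rotation (rotor_array : List (List Int)) : List (List Int) :=
  (rotor_array.foldl
    (fun (st : List (List Int) × Int) rotor =>
      if st.2 = 0 then
        let tmp := pyRotation rotor
        (st.1 ++ [tmp.1], tmp.2)
      else
        (st.1 ++ [rotor], (1 : Int)))
    ([], 0)).1

-- ===== PORT B =====
-- index of the first rotor whose head byte is nonzero; length of the list if none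
-- (r[0] on an empty rotor raises in Python; excluded by Pre_, default never reached under Pre_)
def cutIdx : List (List Int) → Nat
  | [] => 0
  | r :: rs => if (PySem.List.pyGet? r 0).getD 0 ≠ 0 then 0 else 1 + cutIdx rs

def rotOne (r : List Int) : List Int :=
  PySem.List.slice r (some 1) none ++ [(PySem.List.pyGet? r 0).getD 0]

def round_rotation_alt (rotor_array : List (List Int)) : List (List Int) :=
  let cutoff := cutIdx rotor_array
  (rotor_array.take (cutoff + 1)).map rotOne ++ rotor_array.drop (cutoff + 1)

-- ===== PRECONDITION & SPEC =====
-- Pre_ excludes exactly the inputs on which A raises IndexError: an empty rotor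
-- encountered while the carry is still 0 (i.e. before a nonzero head byte is seen).
def preB : List (List Int) → Bool
  | [] => true
  | r :: rs => !r.isEmpty && (if r.headI = 0 then preB rs else true)

def Pre_round_rotation (rotor_array : List (List Int)) : Prop := preB rotor_array = true
instance (rotor_array : List (List Int)) : Decidable (Pre_round_rotation rotor_array) := by
  unfold Pre_round_rotation; infer_instance

def pvWitness_round_rotation : List (List Int) := [[0, 2], [3, 4], [5]]

def Spec_round_rotation (rotor_array : List (List Int)) (out : List (List Int)) : Prop := out = round_rotation_alt rotor_array
instance (rotor_array : List (List Int)) (out : List (List Int)) : Decidable (Spec_round_rotation rotor_array out) := by unfold Spec_round_rotation; infer_instance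

-- ===== CLAIM (what is proved, stated in full; the proofs are below) =====
def Claim_equal_round_rotation : Prop := ∀ (rotor_array : List (List Int)), Dom_round_rotation rotor_array → Pre_round_rotation rotor_array → Spec_round_rotation rotor_array (round_rotation rotor_array)

-- ===== LEMMAS AND PROOFS =====

def stepA (st : List (List Int) × Int) (rotor : List Int) : List (List Int) × Int :=
  if st.2 = 0 then
    let tmp := pyRotation rotor
    (st.1 ++ [tmp.1], tmp.2)
  else
    (st.1 ++ [rotor], (1 : Int))

lemma round_rotation_eq_stepA (ra : List (List Int)) :
    round_rotation ra = (ra.foldl stepA ([], 0)).1 := rfl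

lemma stepA_zero (acc : List (List Int)) (h : Int) (t : List Int) :
    stepA (acc, 0) (h :: t) = (acc ++ [t ++ [h]], h) := by
  simp [stepA, pyRotation, PySem.List.slice_from_one]

lemma stepA_ne (acc : List (List Int)) (c : Int) (hc : c ≠ 0) (r : List Int) :
    stepA (acc, c) r = (acc ++ [r], 1) := by
  simp [stepA, hc]

-- once the carry is nonzero, A's loop appends the remaining rotors unchanged
lemma foldl_carry_ne_zero (l : List (List Int)) (acc : List (List Int)) (c : Int) (hc : c ≠ 0) :
    (l.foldl stepA (acc, c)).1 = acc ++ l := by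
  induction l generalizing acc c with
  | nil => simp
  | cons r rs ih =>
      rw [List.foldl_cons, stepA_ne acc c hc r, ih (acc ++ [r]) 1 one_ne_zero]
      simp

lemma rotOne_cons (h : Int) (t : List Int) : rotOne (h :: t) = t ++ [h] := by
  simp [rotOne, PySem.List.slice_from_one]

lemma cutIdx_cons (h : Int) (t : List Int) (rs : List (List Int)) :
    cutIdx ((h :: t) :: rs) = if h = 0 then 1 + cutIdx rs else 0 := by
  by_cases hz : h = 0 <;> simp [cutIdx, hz]

lemma alt_cons_zero (t : List Int) (rs : List (List Int)) :
    round_rotation_alt (((0 : Int) :: t) :: rs) = (t ++ [0]) :: round_rotation_alt rs := by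
  simp [round_rotation_alt, cutIdx_cons, rotOne_cons, Nat.add_comm 1 (cutIdx rs)]

lemma alt_cons_ne (h : Int) (t : List Int) (rs : List (List Int)) (hz : h ≠ 0) :
    round_rotation_alt ((h :: t) :: rs) = (t ++ [h]) :: rs := by
  simp [round_rotation_alt, cutIdx_cons, hz, rotOne_cons]

lemma foldl_carry_zero (l : List (List Int)) (acc : List (List Int)) (hp : preB l = true) :
    (l.foldl stepA (acc, 0)).1 = acc ++ round_rotation_alt l := by
  induction l generalizing acc with
  | nil => simp [round_rotation_alt, cutIdx]
  | cons r rs ih =>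
      simp only [preB, Bool.and_eq_true, Bool.not_eq_true'] at hp
      obtain ⟨hne, hrest⟩ := hp
      obtain ⟨h, t, rfl⟩ : ∃ h t, r = h :: t := by
        cases r with
        | nil => simp at hne
        | cons h t => exact ⟨h, t, rfl⟩
      rw [List.foldl_cons, stepA_zero]
      by_cases hz : h = 0
      · subst hz
        simp only [List.headI, if_true] at hrest
        rw [ih (acc ++ [t ++ [0]]) hrest, alt_cons_zero]
        simp
      · rw [foldl_carry_ne_zero rs (acc ++ [t ++ [h]]) h hz, alt_cons_ne h t rs hz]
        simp

-- ===== VERDICT (by name: the statement is the Claim_ definition above) =====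
theorem round_rotation_spec : Claim_equal_round_rotation := by
  intro ra _ hpre
  unfold Spec_round_rotation
  rw [round_rotation_eq_stepA, foldl_carry_zero ra [] hpre]
  simp
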